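-- pv_equiv track=rewrite | github.com/dongdongx2x2/TIL | algorithm_solve/Programmers/lv2/convert_binary/sol.py | solution
-- ===== SOURCE A (Python) =====
-- def solution(s):
--     count = 0
--     zeros = 0
--
--     while s != "1":
--         zeros += s.count("0")
--         s = bin(len(s.replace("0", "")))[2:]
--         count += 1
--
--     return [count, zeros]
-- ===== SOURCE B (Python) =====
-- def solution(s):
--     # Integer/bit-arithmetic reformulation: one pass over s, then popcount loop.
--     if s == "1":
--         return [0, 0]
--     zeros = s.count("0")
--     m = len(s) - zeros
--     count = 1
--     while m != 1:
--         ones = 0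
--         t = m
--         while t:
--             if t & 1:
--                 ones += 1
--             else:
--                 zeros += 1
--             t >>= 1
--         m = ones
--         count += 1
--     return [count, zeros]
-- ===== Notes on version B (the rewrite author's own statement) =====
-- stated objective: alternative
-- what changed: Replaces A's repeated string manipulation (count/replace/bin on strings every round) with integer bit arithmetic: one pass computes the initial zero count and m = number of non-'0' characters, then a popcount loop on the integer m tallies removed zero bits and steps, never building a string.
import Mathlib
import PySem

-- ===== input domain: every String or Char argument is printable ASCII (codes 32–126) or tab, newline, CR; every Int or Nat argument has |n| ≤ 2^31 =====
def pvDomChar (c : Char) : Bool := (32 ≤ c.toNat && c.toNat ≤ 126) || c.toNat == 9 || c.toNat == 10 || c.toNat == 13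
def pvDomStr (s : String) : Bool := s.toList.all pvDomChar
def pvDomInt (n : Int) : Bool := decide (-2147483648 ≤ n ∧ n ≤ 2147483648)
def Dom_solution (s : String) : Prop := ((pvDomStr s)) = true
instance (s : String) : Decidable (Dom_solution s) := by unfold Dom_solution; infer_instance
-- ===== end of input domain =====

-- B replaces A's repeated string building (bin(...) / replace / count) by pure
-- integer bit arithmetic over the count of non-'0' characters; alternative, not faster.

-- ===== PORT A =====
-- bin(n)[2:] as a list of characters: '' would be wrong for 0, bin(0)[2:] = "0"
def pvBits (n : Nat) : List Char :=
  if h : n = 0 then [] else pvBits (n / 2) ++ [if n % 2 = 1 then '1' else '0']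
decreasing_by exact Nat.div_lt_self (Nat.pos_of_ne_zero h) (by omega)

def pvBinStr (n : Nat) : List Char := if n = 0 then ['0'] else pvBits n

-- the while loop of A, state (s, count, zeros); fuel only makes it total
-- (A diverges on strings with no non-'0' character; those are outside Pre_).
-- s.count("0") is countP (· = '0') and len(s.replace("0","")) is the length after
-- filtering out '0' — exact, since the needle is a single character.
def pvLoopA : Nat → List Char → Nat → Nat → Nat × Nat
  | 0, _, c, z => (c, z)
  | f + 1, s, c, z =>
    if s = ['1'] then (c, z)
    else pvLoopA f (pvBinStr (s.filter (fun ch => ch ≠ '0')).length) (c + 1)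
           (z + s.countP (fun ch => ch = '0'))

def solution (s : String) : List Int :=
  let r := pvLoopA (s.toList.length + 1) s.toList 0 0
  [(r.1 : Int), (r.2 : Int)]

-- ===== PORT B =====
-- inner `while t:` loop of B: splits the bits of t into ones / zeros counters
def pvBitsLoop : Nat → Nat → Nat → Nat × Nat
  | t, ones, zeros =>
    if h : t = 0 then (ones, zeros)
    else pvBitsLoop (t / 2) (if t % 2 = 1 then ones + 1 else ones)
           (if t % 2 = 1 then zeros else zeros + 1)
decreasing_by exact Nat.div_lt_self (Nat.pos_of_ne_zero h) (by omega)

-- outer `while m != 1:` loop of B; fuel only makes it total (B diverges where A does)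
def pvLoopB : Nat → Nat → Nat → Nat → Nat × Nat
  | 0, _, c, z => (c, z)
  | f + 1, m, c, z =>
    if m = 1 then (c, z)
    else
      let oz := pvBitsLoop m 0 z
      pvLoopB f oz.1 (c + 1) oz.2

def solution_alt (s : String) : List Int :=
  if s = "1" then [0, 0]
  else
    let zeros := s.toList.countP (fun ch => ch = '0')  -- s.count("0"), single-char needle
    let m := s.toList.length - zeros
    let r := pvLoopB (m + 1) m 1 zeros
    [(r.1 : Int), (r.2 : Int)]

-- ===== PRECONDITION & SPEC =====
-- Pre_ excludes exactly the strings with no character other than '0' (including ""),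
-- on which A's while loop never terminates (s becomes "0" forever); B diverges there too.
def Pre_solution (s : String) : Prop := s.toList.any (fun c => c ≠ '0') = true
instance (s : String) : Decidable (Pre_solution s) := by unfold Pre_solution; infer_instance
def pvWitness_solution : String := "10"

def Spec_solution (s : String) (out : List Int) : Prop := out = solution_alt s
instance (s : String) (out : List Int) : Decidable (Spec_solution s out) := by unfold Spec_solution; infer_instance

-- ===== CLAIM (what is proved, stated in full; the proofs are below) =====
def Claim_equal_solution : Prop := ∀ (s : String), Dom_solution s → Pre_solution s → Spec_solution s (solution s)

-- ===== LEMMAS AND PROOFS =====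

-- popcount and zero-bit count of n's binary representation
def pvPc : Nat → Nat
  | n => if h : n = 0 then 0 else pvPc (n / 2) + n % 2
decreasing_by exact Nat.div_lt_self (Nat.pos_of_ne_zero h) (by omega)

def pvZc : Nat → Nat
  | n => if h : n = 0 then 0 else pvZc (n / 2) + (1 - n % 2)
decreasing_by exact Nat.div_lt_self (Nat.pos_of_ne_zero h) (by omega)

lemma pvBitsLoop_eq (t : Nat) : ∀ o z, pvBitsLoop t o z = (o + pvPc t, z + pvZc t) := by
  induction t using Nat.strong_induction_on with
  | _ t ih =>
    intro o z
    rw [pvBitsLoop, pvPc, pvZc]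
    by_cases h : t = 0
    · simp [h]
    · have ht : t / 2 < t := Nat.div_lt_self (Nat.pos_of_ne_zero h) (by omega)
      simp only [h, dif_neg, if_neg, reduceDIte]
      rw [ih _ ht]
      have : t % 2 = 0 ∨ t % 2 = 1 := by omega
      rcases this with h2 | h2 <;> simp [h2] <;> omega

lemma pvPc_le (n : Nat) : pvPc n ≤ n := by
  induction n using Nat.strong_induction_on with
  | _ n ih =>
    rw [pvPc]
    by_cases h : n = 0
    · simp [h]
    · have ht : n / 2 < n := Nat.div_lt_self (Nat.pos_of_ne_zero h) (by omega)
      have := ih _ ht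
      simp only [h, reduceDIte]
      omega

lemma pvPc_pos (n : Nat) (h : 1 ≤ n) : 1 ≤ pvPc n := by
  induction n using Nat.strong_induction_on with
  | _ n ih =>
    rw [pvPc]
    have h0 : n ≠ 0 := by omega
    simp only [h0, reduceDIte]
    have : n % 2 = 0 ∨ n % 2 = 1 := by omega
    rcases this with h2 | h2
    · have hd : n / 2 < n := Nat.div_lt_self (by omega) (by omega)
      have hd1 : 1 ≤ n / 2 := by omega
      have := ih _ hd hd1
      omega
    · omega

lemma pvPc_lt (n : Nat) (h : 2 ≤ n) : pvPc n < n := by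
  rw [pvPc]
  have h0 : n ≠ 0 := by omega
  simp only [h0, reduceDIte]
  have := pvPc_le (n / 2)
  omega

lemma pvBits_filter (n : Nat) :
    ((pvBits n).filter (fun ch => ch ≠ '0')).length = pvPc n ∧
    (pvBits n).countP (fun ch => ch = '0') = pvZc n := by
  induction n using Nat.strong_induction_on with
  | _ n ih =>
    rw [pvBits, pvPc, pvZc]
    by_cases h : n = 0
    · simp [h]
    · have ht : n / 2 < n := Nat.div_lt_self (Nat.pos_of_ne_zero h) (by omega)
      obtain ⟨ih1, ih2⟩ := ih _ ht
      simp only [ne_eq, decide_not] at ih1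
      have : n % 2 = 0 ∨ n % 2 = 1 := by omega
      rcases this with h2 | h2 <;>
        simp [h, h2, List.filter_append, List.countP_append, ih1, ih2, ne_eq, decide_not]

lemma pvBits_ne_nil (n : Nat) (h : n ≠ 0) : pvBits n ≠ [] := by
  rw [pvBits]; simp [h]

lemma pvBits_one : pvBits 1 = ['1'] := by
  rw [pvBits]; norm_num; rw [pvBits]; simp

lemma pvBits_eq_one_iff (n : Nat) (hn : n ≠ 0) : pvBits n = ['1'] ↔ n = 1 := by
  constructor
  · intro h
    rw [pvBits] at h
    simp only [hn, reduceDIte] at h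
    have hnil : pvBits (n / 2) = [] := by
      cases h' : pvBits (n / 2) with
      | nil => rfl
      | cons a l =>
        rw [h'] at h
        have := congrArg List.length h
        simp at this
    have hdiv : n / 2 = 0 := by
      by_contra hc
      exact pvBits_ne_nil _ hc hnil
    rw [hnil] at h
    simp at h
    have : n % 2 = 1 := by
      by_contra hc
      simp [hc] at h
    omega
  · intro h; subst h; exact pvBits_one

-- the two loops keep identical (count, zeros) state, so they agree at every fuel
lemma loopA_eq_loopB (f : Nat) : ∀ m c z, 1 ≤ m →
    pvLoopA f (pvBinStr m) c z = pvLoopB f m c z := by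
  induction f with
  | zero => intro m c z _; rfl
  | succ f ih =>
    intro m c z hm
    have hm0 : m ≠ 0 := by omega
    rw [pvLoopA, pvLoopB]
    have hbin : pvBinStr m = pvBits m := by simp [pvBinStr, hm0]
    rw [hbin]
    by_cases h1 : m = 1
    · simp [h1, pvBits_one]
    · rw [if_neg ((pvBits_eq_one_iff m hm0).not.mpr h1), if_neg h1]
      obtain ⟨hf, hc⟩ := pvBits_filter m
      rw [hf, hc, pvBitsLoop_eq]
      simp only [Nat.zero_add]
      exact ih _ _ _ (pvPc_pos m hm)

-- enough fuel: once m ≤ fuel (m ≥ 1), the result no longer depends on fuel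
lemma loopB_fuel (m : Nat) : ∀ f1 f2 c z, 1 ≤ m → m ≤ f1 → m ≤ f2 →
    pvLoopB f1 m c z = pvLoopB f2 m c z := by
  induction m using Nat.strong_induction_on with
  | _ m ih =>
    intro f1 f2 c z hm hf1 hf2
    obtain ⟨g1, rfl⟩ : ∃ g, f1 = g + 1 := ⟨f1 - 1, by omega⟩
    obtain ⟨g2, rfl⟩ : ∃ g, f2 = g + 1 := ⟨f2 - 1, by omega⟩
    rw [pvLoopB, pvLoopB]
    by_cases h1 : m = 1
    · simp [h1]
    · rw [if_neg h1, if_neg h1]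
      have h2 : 2 ≤ m := by omega
      have hlt := pvPc_lt m h2
      have hpos := pvPc_pos m hm
      simp only [pvBitsLoop_eq, Nat.zero_add]
      exact ih _ hlt _ _ _ _ hpos (by omega) (by omega)

lemma filter_length_eq (l : List Char) :
    (l.filter (fun ch => ch ≠ '0')).length = l.length - l.countP (fun ch => ch = '0') := by
  induction l with
  | nil => rfl
  | cons a t iht =>
    have hle : t.countP (fun ch => ch = '0') ≤ t.length := List.countP_le_length
    simp only [ne_eq, decide_not] at iht ⊢
    by_cases h : a = '0' <;>
      simp [List.filter_cons, List.countP_cons, h, iht] <;> omega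

lemma countP_le (l : List Char) : l.countP (fun ch => ch = '0') ≤ l.length :=
  List.countP_le_length

-- ===== VERDICT (by name: the statement is the Claim_ definition above) =====
theorem solution_spec : Claim_equal_solution := by
  intro s _ hpre
  unfold Spec_solution solution solution_alt
  rw [Pre_solution, List.any_eq_true] at hpre
  obtain ⟨c0, hc0mem, hc0⟩ := hpre
  simp only [ne_eq, decide_not, Bool.not_eq_eq_eq_not, Bool.not_true, decide_eq_false_iff_not] at hc0
  set l := s.toList with hl
  have hm1 : 1 ≤ (l.filter (fun ch => ch ≠ '0')).length := by
    have : c0 ∈ l.filter (fun ch => ch ≠ '0') := by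
      simp [List.mem_filter, hc0mem, hc0]
    exact List.length_pos_of_mem this
  by_cases hone : s = "1"
  · subst hone
    decide
  · have hlne : l ≠ ['1'] := by
      intro h
      apply hone
      have : s.toList = "1".toList := h
      exact String.toList_injective this
    rw [if_neg hone]
    simp only
    rw [pvLoopA, if_neg hlne]
    set z0 := l.countP (fun ch => ch = '0') with hz0
    set m := (l.filter (fun ch => ch ≠ '0')).length with hmdef
    have hmz : m = l.length - z0 := filter_length_eq l
    have hmle : m ≤ l.length := by
      have := countP_le l
      omega
    rw [loopA_eq_loopB _ _ _ _ hm1, hmz]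
    have hfuel := loopB_fuel (l.length - z0) l.length (l.length - z0 + 1) (0 + 1) (0 + z0)
      (by omega) (by omega) (by omega)
    rw [hfuel]
    norm_num
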